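-- pv_equiv track=rewrite | github.com/injuryholmes/Time-Series-Forecasting-with-Deep-Learning | src/utils/data_loading.py | collate_lines
-- ===== SOURCE A (Python) =====
-- def collate_lines(seq_list):
--     train_, val_, test_, info_cat_, idx_ = zip(*seq_list)
--     train_lens = [len(seq) for seq in train_]
--     seq_order = sorted(range(len(train_lens)), key=train_lens.__getitem__, reverse=True)
--     train = [train_[i] for i in seq_order]
--     val = [val_[i] for i in seq_order]
--     test = [test_[i] for i in seq_order]
--     info_cat = [info_cat_[i] for i in seq_order]
--     idx = [idx_[i] for i in seq_order]
--     return train, val, test, info_cat, idx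
-- ===== SOURCE B (Python) =====
-- def collate_lines(seq_list):
--     remaining = list(seq_list)
--     train, val, test, info_cat, idx = [], [], [], [], []
--     while remaining:
--         row = max(remaining, key=lambda r: len(r[0]))
--         remaining.remove(row)
--         train.append(row[0])
--         val.append(row[1])
--         test.append(row[2])
--         info_cat.append(row[3])
--         idx.append(row[4])
--     return train, val, test, info_cat, idx
-- ===== Notes on version B (the rewrite author's own statement) =====
-- stated objective: alternative
-- what changed: B replaces A's argsort (sorted index permutation keyed by a separate lengths list, then five index-gather comprehensions) with a selection loop: repeatedly take the first row of maximal len(row[0]) out of the remaining rows and append its five fields to five accumulators; it trades A's O(n log n) library sort for an O(n^2) selection sort with no index arrays.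
import Mathlib
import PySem

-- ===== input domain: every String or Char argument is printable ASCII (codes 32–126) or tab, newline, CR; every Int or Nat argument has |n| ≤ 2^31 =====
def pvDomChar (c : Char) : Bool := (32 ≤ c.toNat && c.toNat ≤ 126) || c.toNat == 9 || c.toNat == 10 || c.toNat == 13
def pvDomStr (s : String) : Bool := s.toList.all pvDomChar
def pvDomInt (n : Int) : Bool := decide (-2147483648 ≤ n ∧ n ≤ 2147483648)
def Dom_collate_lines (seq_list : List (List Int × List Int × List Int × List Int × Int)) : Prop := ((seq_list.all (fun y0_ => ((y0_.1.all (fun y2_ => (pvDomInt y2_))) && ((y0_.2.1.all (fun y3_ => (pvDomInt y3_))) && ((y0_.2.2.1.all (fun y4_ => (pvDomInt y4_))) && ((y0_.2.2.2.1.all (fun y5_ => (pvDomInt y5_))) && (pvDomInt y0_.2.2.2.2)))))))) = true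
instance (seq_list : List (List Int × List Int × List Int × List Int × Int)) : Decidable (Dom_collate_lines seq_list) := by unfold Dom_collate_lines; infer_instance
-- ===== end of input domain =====

-- B replaces A's argsort-and-gather by a selection loop (repeatedly extract the first
-- remaining row of maximal first-field length); alternative algorithm, no speed claim.


-- ===== PORT A =====
-- A: unzip columns, sort the index list by the lengths column (descending, stable), gather each column.
def collate_lines (seq_list : List (List Int × List Int × List Int × List Int × Int)) : List (List Int) × List (List Int) × List (List Int) × List (List Int) × List Int :=
  let train_ := seq_list.map (·.1)
  let val_ := seq_list.map (·.2.1)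
  let test_ := seq_list.map (·.2.2.1)
  let info_cat_ := seq_list.map (·.2.2.2.1)
  let idx_ := seq_list.map (·.2.2.2.2)
  let train_lens := train_.map (fun s => (s.length : Int))
  let seq_order := PySem.List.sorted (PySem.List.pyRange 0 (train_lens.length : Int) 1)
    (fun i => PySem.List.pyGetD train_lens i 0) true
  let train := seq_order.map (fun i => PySem.List.pyGetD train_ i [])
  let val := seq_order.map (fun i => PySem.List.pyGetD val_ i [])
  let test := seq_order.map (fun i => PySem.List.pyGetD test_ i [])
  let info_cat := seq_order.map (fun i => PySem.List.pyGetD info_cat_ i [])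
  let idx := seq_order.map (fun i => PySem.List.pyGetD idx_ i 0)
  (train, val, test, info_cat, idx)

-- ===== PORT B =====
-- termination fact for the selection loop (cited by decreasing_by): remove? shortens the list
theorem pv_remove?_length {α : Type} [BEq α] [LawfulBEq α] {xs ys : List α} {v : α}
    (h : PySem.List.remove? xs v = some ys) : ys.length < xs.length := by
  simp only [PySem.List.remove?, Option.map_eq_some_iff] at h
  obtain ⟨k, hk, rfl⟩ := h
  rw [List.idxOf?_eq_some_iff] at hk
  obtain ⟨hlt, -, -⟩ := hk
  simp [List.length_eraseIdx, hlt]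
  omega

-- B: while rows remain, take the first remaining row with maximal len(row[0]) ('max' returns the
-- first maximum), remove it, and append its five fields to the five output lists.
def collate_lines_alt_loop (remaining : List (List Int × List Int × List Int × List Int × Int))
    (train val test info_cat : List (List Int)) (idx : List Int) :
    List (List Int) × List (List Int) × List (List Int) × List (List Int) × List Int :=
  match hm : PySem.List.max? remaining (fun r => (r.1.length : Int)) with
  | none => (train, val, test, info_cat, idx)
  | some row =>
    match hr : PySem.List.remove? remaining row with
    | none => (train, val, test, info_cat, idx)  -- unreachable (row ∈ remaining); total-guard only
    | some remaining' =>
      collate_lines_alt_loop remaining' (train ++ [row.1]) (val ++ [row.2.1])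
        (test ++ [row.2.2.1]) (info_cat ++ [row.2.2.2.1]) (idx ++ [row.2.2.2.2])
termination_by remaining.length
decreasing_by exact pv_remove?_length hr

def collate_lines_alt (seq_list : List (List Int × List Int × List Int × List Int × Int)) : List (List Int) × List (List Int) × List (List Int) × List (List Int) × List Int :=
  collate_lines_alt_loop seq_list [] [] [] [] []

-- ===== PRECONDITION & SPEC =====
-- Pre_ excludes only the empty list, on which A's 'zip(*seq_list)' unpacking raises ValueError.
def Pre_collate_lines (seq_list : List (List Int × List Int × List Int × List Int × Int)) : Prop := seq_list ≠ []
instance (seq_list : List (List Int × List Int × List Int × List Int × Int)) : Decidable (Pre_collate_lines seq_list) := by unfold Pre_collate_lines; infer_instance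
def pvWitness_collate_lines : (List (List Int × List Int × List Int × List Int × Int)) := [([1, 2], [3], [4], [5], 0), ([7], [8], [9], [10], 1)]
def Spec_collate_lines (seq_list : List (List Int × List Int × List Int × List Int × Int)) (out : List (List Int) × List (List Int) × List (List Int) × List (List Int) × List Int) : Prop := out = collate_lines_alt seq_list
instance (seq_list : List (List Int × List Int × List Int × List Int × Int)) (out : List (List Int) × List (List Int) × List (List Int) × List (List Int) × List Int) : Decidable (Spec_collate_lines seq_list out) := by unfold Spec_collate_lines; infer_instance

-- ===== CLAIM (what is proved, stated in full; the proofs are below) =====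
def Claim_equal_collate_lines : Prop := ∀ (seq_list : List (List Int × List Int × List Int × List Int × Int)), Dom_collate_lines seq_list → Pre_collate_lines seq_list → Spec_collate_lines seq_list (collate_lines seq_list)

-- ===== LEMMAS AND PROOFS =====

-- inserting a mapped element into a mapped list = mapping the insertion (comparator read through g)
theorem pv_insertBy_map {a b : Type} (before : b -> b -> Bool) (g : a -> b) (x : a) (ys : List a) :
    PySem.List.insertBy before (g x) (ys.map g) =
      (PySem.List.insertBy (fun p q => before (g p) (g q)) x ys).map g := by
  induction ys with
  | nil => simp [PySem.List.insertBy]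
  | cons y ys ih =>
    simp only [List.map, PySem.List.insertBy]
    split_ifs <;> simp [ih]

-- stable descending sort commutes with map when the key factors through the map
theorem pv_sorted_rev_map {a b k : Type} [LT k] [DecidableLT k] (g : a -> b) (key : b -> k) (xs : List a) :
    PySem.List.sorted (xs.map g) key true =
      (PySem.List.sorted xs (fun p => key (g p)) true).map g := by
  rw [PySem.List.sorted_rev_eq_foldl_insertBy, PySem.List.sorted_rev_eq_foldl_insertBy]
  suffices h : ∀ (acc : List a),
      (xs.map g).foldl (fun acc x => PySem.List.insertBy (fun p q => decide (key q < key p)) x acc) (acc.map g)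
        = (xs.foldl (fun acc x => PySem.List.insertBy (fun p q => decide (key (g q) < key (g p))) x acc) acc).map g by
    simpa using h []
  induction xs with
  | nil => intro acc; simp
  | cons x xs ih =>
    intro acc
    simp only [List.map, List.foldl]
    rw [pv_insertBy_map (fun p q => decide (key q < key p)) g x acc, ih]

-- A computes the five columns of the stably length-descending-sorted row list
theorem pv_collate_lines_eq_sorted (seq_list : List (List Int × List Int × List Int × List Int × Int)) :
    collate_lines seq_list =
      (let S := PySem.List.sorted seq_list (fun row => (row.1.length : Int)) true
       (S.map (·.1), S.map (·.2.1), S.map (·.2.2.1), S.map (·.2.2.2.1), S.map (·.2.2.2.2))) := by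
  unfold collate_lines
  simp only [List.length_map]
  set gfull : Int -> (List Int × List Int × List Int × List Int × Int) :=
    fun i => PySem.List.pyGetD seq_list i ([], [], [], [], 0) with hg
  have hidx : (PySem.List.pyRange 0 ((seq_list.length : Int)) 1).map gfull = seq_list := by
    rw [hg]; exact PySem.List.map_pyGetD_pyRange_zero' seq_list ([], [], [], [], 0)
  have hkey : (fun i => PySem.List.pyGetD ((seq_list.map (·.1)).map (fun s => (s.length : Int))) i 0)
      = fun i => ((gfull i).1.length : Int) := by
    funext i
    have h1 := PySem.List.pyGetD_map (fun s : List Int => (s.length : Int)) (seq_list.map (·.1)) i []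
    have h2 := PySem.List.pyGetD_map (fun r : (List Int × List Int × List Int × List Int × Int) => r.1) seq_list i ([], [], [], [], 0)
    simp only [List.length_nil, Int.natCast_zero] at h1
    rw [h1, h2, hg]
  rw [hkey]
  have hmain : (PySem.List.sorted (PySem.List.pyRange 0 ((seq_list.length : Int)) 1)
        (fun i => ((gfull i).1.length : Int)) true).map gfull
      = PySem.List.sorted seq_list (fun row => (row.1.length : Int)) true := by
    rw [← pv_sorted_rev_map gfull (fun row => (row.1.length : Int))
        (PySem.List.pyRange 0 ((seq_list.length : Int)) 1), hidx]
  rw [← hmain]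
  refine congrArg₂ _ ?_ (congrArg₂ _ ?_ (congrArg₂ _ ?_ (congrArg₂ _ ?_ ?_))) <;>
  · rw [List.map_map]
    refine List.map_congr_left (fun i _ => ?_)
    simp only [Function.comp, hg]
    first
      | exact PySem.List.pyGetD_map (fun r : (List Int × List Int × List Int × List Int × Int) => r.1) seq_list i ([], [], [], [], 0)
      | exact PySem.List.pyGetD_map (fun r : (List Int × List Int × List Int × List Int × Int) => r.2.1) seq_list i ([], [], [], [], 0)
      | exact PySem.List.pyGetD_map (fun r : (List Int × List Int × List Int × List Int × Int) => r.2.2.1) seq_list i ([], [], [], [], 0)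
      | exact PySem.List.pyGetD_map (fun r : (List Int × List Int × List Int × List Int × Int) => r.2.2.2.1) seq_list i ([], [], [], [], 0)
      | exact PySem.List.pyGetD_map (fun r : (List Int × List Int × List Int × List Int × Int) => r.2.2.2.2) seq_list i ([], [], [], [], 0)

-- selection step: the stable descending sort is the first maximum followed by the
-- stable descending sort of the list with that first maximum's first occurrence removed
theorem pv_sorted_rev_select {a : Type} [BEq a] [LawfulBEq a] (key : a -> Int) :
    ∀ (xs : List a) (m : a), PySem.List.max? xs key = some m →
      ∃ ys, PySem.List.remove? xs m = some ys ∧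
        PySem.List.sorted xs key true = m :: PySem.List.sorted ys key true := by
  have hsnoc : ∀ (zs : List a) (z : a), PySem.List.sorted (zs ++ [z]) key true
      = PySem.List.insertBy (fun p q => decide (key q < key p)) z (PySem.List.sorted zs key true) := by
    intro zs z
    rw [PySem.List.sorted_rev_eq_foldl_insertBy, PySem.List.sorted_rev_eq_foldl_insertBy,
      List.foldl_append]
    rfl
  have hmaxsnoc : ∀ (zs : List a) (z : a), PySem.List.max? (zs ++ [z]) key
      = match PySem.List.max? zs key with
        | none => some z
        | some m' => if key m' < key z then some z else some m' := by
    intro zs z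
    simp only [PySem.List.max?, List.foldl_append]
    rfl
  intro xs
  induction xs using List.reverseRecOn with
  | nil => intro m hm; simp [PySem.List.max?] at hm
  | append_singleton ys y ih =>
    intro m hm
    rw [hmaxsnoc] at hm
    cases hys : PySem.List.max? ys key with
    | none =>
      rw [hys] at hm
      have hnil : ys = [] := (PySem.List.max?_eq_none_iff ys key).mp hys
      subst hnil
      cases hm
      exact ⟨[], by simp [PySem.List.remove?],
        by simp [PySem.List.sorted, PySem.List.insertBy]⟩
    | some m' =>
      rw [hys] at hm
      replace hm : (if key m' < key y then some y else some m') = some m := hm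
      by_cases hlt : key m' < key y
      · rw [if_pos hlt] at hm
        cases hm
        have hnot : ∀ z ∈ ys, ¬ z = y := by
          intro z hz hzy
          have hle := PySem.List.max?_isMax hys z hz
          subst hzy
          omega
        have hidx : List.idxOf? y (ys ++ [y]) = some ys.length := by
          rw [List.idxOf?_eq_some_iff]
          refine ⟨by simp, by simp, ?_⟩
          intro j hj
          rw [List.getElem_append_left hj]
          exact hnot _ (List.getElem_mem hj)
        have hrem : PySem.List.remove? (ys ++ [y]) y = some ys := by
          simp [PySem.List.remove?, hidx, List.eraseIdx_append_of_length_le (le_refl ys.length)]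
        refine ⟨ys, hrem, ?_⟩
        rw [hsnoc]
        cases hs : PySem.List.sorted ys key true with
        | nil => simp [PySem.List.insertBy]
        | cons z zs =>
          have hzmem : z ∈ ys := by
            have : z ∈ PySem.List.sorted ys key true := by rw [hs]; simp
            exact (PySem.List.mem_sorted _ _ _ _).mp this
          have hzle := PySem.List.max?_isMax hys z hzmem
          simp [PySem.List.insertBy, show key z < key y by omega]
      · rw [if_neg hlt] at hm
        cases hm
        obtain ⟨zs, hrem, hsort⟩ := ih m hys
        simp only [PySem.List.remove?, Option.map_eq_some_iff] at hrem
        obtain ⟨k, hk, hzs⟩ := hrem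
        obtain ⟨hklt, hkget, hkmin⟩ := (List.idxOf?_eq_some_iff).mp hk
        have hidx2 : List.idxOf? m (ys ++ [y]) = some k := by
          rw [List.idxOf?_eq_some_iff]
          refine ⟨by simp; omega, ?_, ?_⟩
          · rw [List.getElem_append_left hklt]
            exact hkget
          · intro j hj
            rw [List.getElem_append_left (Nat.lt_trans hj hklt)]
            exact hkmin j hj
        have hrem2 : PySem.List.remove? (ys ++ [y]) m = some (zs ++ [y]) := by
          simp [PySem.List.remove?, hidx2, List.eraseIdx_append_of_lt_length hklt, hzs]
        refine ⟨zs ++ [y], hrem2, ?_⟩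
        rw [hsnoc, hsort, hsnoc]
        simp [PySem.List.insertBy, hlt]

-- the loop produces the accumulators followed by the five columns of the sorted remaining rows
theorem pv_loop_eq_sorted (remaining : List (List Int × List Int × List Int × List Int × Int))
    (train val test info_cat : List (List Int)) (idx : List Int) :
    collate_lines_alt_loop remaining train val test info_cat idx =
      (let S := PySem.List.sorted remaining (fun row => (row.1.length : Int)) true
       (train ++ S.map (·.1), val ++ S.map (·.2.1), test ++ S.map (·.2.2.1),
        info_cat ++ S.map (·.2.2.2.1), idx ++ S.map (·.2.2.2.2))) := by
  induction remaining, train, val, test, info_cat, idx using collate_lines_alt_loop.induct with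
  | case1 remaining train val test info_cat idx hm =>
    have hnil : remaining = [] := (PySem.List.max?_eq_none_iff _ _).mp hm
    subst hnil
    simp [collate_lines_alt_loop, PySem.List.max?, PySem.List.sorted]
  | case2 remaining train val test info_cat idx row hm hr =>
    obtain ⟨ys, hrem, -⟩ := pv_sorted_rev_select (fun r : List Int × List Int × List Int × List Int × Int => (r.1.length : Int)) _ _ hm
    rw [hrem] at hr
    cases hr
  | case3 remaining train val test info_cat idx row hm remaining' hr ih =>
    obtain ⟨ys, hrem, hsort⟩ := pv_sorted_rev_select (fun r : List Int × List Int × List Int × List Int × Int => (r.1.length : Int)) _ _ hm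
    rw [hr] at hrem
    cases hrem
    rw [collate_lines_alt_loop]
    split
    next h => rw [hm] at h; cases h
    next row' h =>
      rw [hm] at h
      cases h
      split
      next h2 => rw [hr] at h2; cases h2
      next rem2 h2 =>
        rw [hr] at h2
        cases h2
        rw [ih, hsort]
        simp

-- ===== VERDICT (by name: the statement is the Claim_ definition above) =====
theorem collate_lines_spec : Claim_equal_collate_lines := by
  intro seq_list _ _
  unfold Spec_collate_lines collate_lines_alt
  rw [pv_collate_lines_eq_sorted, pv_loop_eq_sorted]
  simp
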